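-- pv_equiv track=rewrite | github.com/oleg2013/backend.vkusonline | emulator/lifecycle.py | magnit_next_step
-- ===== SOURCE A (Python) =====
-- MAGNIT_HAPPY_PATH: list[str] = [
--     "NEW",
--     "CREATED",
--     "DELIVERING_STARTED",
--     "ACCEPTED_AT_POINT",
--     "ISSUED",
-- ]
--
-- MAGNIT_RETURN_PATH: list[str] = [
--     # Starts after ACCEPTED_AT_POINT
--     "WAITING_RETURN",
--     "RETURN_INITIATED",
--     "RETURN_SEND_TO_WAREHOUSE",
--     "RETURN_ACCEPTED_AT_WAREHOUSE",
--     "RETURNED_TO_PROVIDER",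
-- ]
--
-- def magnit_next_step(current_status: str) -> str | None:
--     """Return the next status in the happy path, or None if terminal/not found."""
--     for i, s in enumerate(MAGNIT_HAPPY_PATH):
--         if s == current_status:
--             if i + 1 < len(MAGNIT_HAPPY_PATH):
--                 return MAGNIT_HAPPY_PATH[i + 1]
--             return None
--
--     # Check return path
--     for i, s in enumerate(MAGNIT_RETURN_PATH):
--         if s == current_status:
--             if i + 1 < len(MAGNIT_RETURN_PATH):
--                 return MAGNIT_RETURN_PATH[i + 1]
--             return None
--
--     return None
-- ===== SOURCE B (Python) =====
-- def magnit_next_step(current_status: str) -> str | None: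
--     """Return the next status in the happy path, or None if terminal/not found."""
--     match current_status:
--         case "NEW":
--             return "CREATED"
--         case "CREATED":
--             return "DELIVERING_STARTED"
--         case "DELIVERING_STARTED":
--             return "ACCEPTED_AT_POINT"
--         case "ACCEPTED_AT_POINT":
--             return "ISSUED"
--         case "WAITING_RETURN":
--             return "RETURN_INITIATED"
--         case "RETURN_INITIATED":
--             return "RETURN_SEND_TO_WAREHOUSE"
--         case "RETURN_SEND_TO_WAREHOUSE":
--             return "RETURN_ACCEPTED_AT_WAREHOUSE"
--         case "RETURN_ACCEPTED_AT_WAREHOUSE":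
--             return "RETURNED_TO_PROVIDER"
--         case _:
--             return None
-- ===== Notes on version B (the rewrite author's own statement) =====
-- stated objective: simpler
-- what changed: Eliminates the path lists and their two indexed enumerate-scans entirely: the fixed lifecycle transitions are unrolled into a straight-line match statement with one case per non-terminal status, so no data structure is traversed at all.
import Mathlib
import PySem

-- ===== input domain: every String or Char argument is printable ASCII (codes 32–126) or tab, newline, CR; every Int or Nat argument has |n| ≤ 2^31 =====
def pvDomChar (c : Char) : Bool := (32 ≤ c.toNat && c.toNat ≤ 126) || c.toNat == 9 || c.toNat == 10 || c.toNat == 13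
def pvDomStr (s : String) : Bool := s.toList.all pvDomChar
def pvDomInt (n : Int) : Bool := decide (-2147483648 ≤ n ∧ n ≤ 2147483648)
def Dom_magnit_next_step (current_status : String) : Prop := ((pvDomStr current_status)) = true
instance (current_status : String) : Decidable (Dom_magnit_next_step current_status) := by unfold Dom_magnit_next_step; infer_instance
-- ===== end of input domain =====

-- B unrolls the fixed lifecycle into a straight-line match with one case per non-terminal status (no lists, no scans); return values proved equal on all inputs.

-- ===== PORT A =====
def MAGNIT_HAPPY_PATH : List String :=
  ["NEW", "CREATED", "DELIVERING_STARTED", "ACCEPTED_AT_POINT", "ISSUED"]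

def MAGNIT_RETURN_PATH : List String :=
  ["WAITING_RETURN", "RETURN_INITIATED", "RETURN_SEND_TO_WAREHOUSE",
   "RETURN_ACCEPTED_AT_WAREHOUSE", "RETURNED_TO_PROVIDER"]

-- 'for i, s in enumerate(path): if s == current_status: …' with early return,
-- as a structural scan over the enumerated list.
def pvScanPath (current_status : String) (path : List String) :
    List (Int × String) → Option (Option String)
  | [] => none
  | (i, s) :: rest =>
      if s == current_status then
        if i + 1 < (path.length : Int) then
          some (PySem.List.pyGetD path (i + 1) "")
        else some none
      else pvScanPath current_status path rest

def magnit_next_step (current_status : String) : Option String :=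
  match pvScanPath current_status MAGNIT_HAPPY_PATH
      (PySem.List.enumerate MAGNIT_HAPPY_PATH) with
  | some r => r
  | none =>
    match pvScanPath current_status MAGNIT_RETURN_PATH
        (PySem.List.enumerate MAGNIT_RETURN_PATH) with
    | some r => r
    | none => none

-- ===== PORT B =====
-- Source B's 'match current_status: case "NEW": return "CREATED" …', straight-line.
def magnit_next_step_alt (current_status : String) : Option String :=
  match current_status with
  | "NEW" => some "CREATED"
  | "CREATED" => some "DELIVERING_STARTED"
  | "DELIVERING_STARTED" => some "ACCEPTED_AT_POINT"
  | "ACCEPTED_AT_POINT" => some "ISSUED"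
  | "WAITING_RETURN" => some "RETURN_INITIATED"
  | "RETURN_INITIATED" => some "RETURN_SEND_TO_WAREHOUSE"
  | "RETURN_SEND_TO_WAREHOUSE" => some "RETURN_ACCEPTED_AT_WAREHOUSE"
  | "RETURN_ACCEPTED_AT_WAREHOUSE" => some "RETURNED_TO_PROVIDER"
  | _ => none

-- ===== PRECONDITION & SPEC =====
def Spec_magnit_next_step (current_status : String) (out : Option String) : Prop := out = magnit_next_step_alt current_status
instance (current_status : String) (out : Option String) : Decidable (Spec_magnit_next_step current_status out) := by unfold Spec_magnit_next_step; infer_instance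

-- ===== CLAIM (what is proved, stated in full; the proofs are below) =====
def Claim_equal_magnit_next_step : Prop := ∀ (current_status : String), Dom_magnit_next_step current_status → Spec_magnit_next_step current_status (magnit_next_step current_status)

-- ===== LEMMAS AND PROOFS =====
theorem magnit_eq (c : String) : magnit_next_step c = magnit_next_step_alt c := by
  by_cases h1 : "NEW" = c
  · subst h1; decide
  by_cases h2 : "CREATED" = c
  · subst h2; decide
  by_cases h3 : "DELIVERING_STARTED" = c
  · subst h3; decide
  by_cases h4 : "ACCEPTED_AT_POINT" = c
  · subst h4; decide
  by_cases h5 : "ISSUED" = c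
  · subst h5; decide
  by_cases h6 : "WAITING_RETURN" = c
  · subst h6; decide
  by_cases h7 : "RETURN_INITIATED" = c
  · subst h7; decide
  by_cases h8 : "RETURN_SEND_TO_WAREHOUSE" = c
  · subst h8; decide
  by_cases h9 : "RETURN_ACCEPTED_AT_WAREHOUSE" = c
  · subst h9; decide
  by_cases h10 : "RETURNED_TO_PROVIDER" = c
  · subst h10; decide
  have hA : magnit_next_step c = none := by
    simp [magnit_next_step, pvScanPath, MAGNIT_HAPPY_PATH, MAGNIT_RETURN_PATH,
      PySem.List.enumerate, h1, h2, h3, h4, h5, h6, h7, h8, h9, h10]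
  have hB : magnit_next_step_alt c = none := by
    unfold magnit_next_step_alt
    split <;> simp_all
  rw [hA, hB]

-- ===== VERDICT (by name: the statement is the Claim_ definition above) =====
theorem magnit_next_step_spec : Claim_equal_magnit_next_step := by
  intro c _
  exact magnit_eq c
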